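-- pv_equiv track=rewrite | github.com/lexisvar/caissify_pairings | tests/test_baku_acceleration.py | _all_ids_accounted_for
-- ===== SOURCE A (Python) =====
-- from typing import Dict, List, Set, Tuple
--
-- def _all_ids_accounted_for(result: List[dict], players: List[dict]) -> bool:
--     seen: Dict[int, int] = {}
--     for pr in result:
--         seen[pr["white_id"]] = seen.get(pr["white_id"], 0) + 1
--         if pr.get("black_id") is not None:
--             seen[pr["black_id"]] = seen.get(pr["black_id"], 0) + 1
--     if set(seen.keys()) != {p["id"] for p in players}:
--         return False
--     return all(v == 1 for v in seen.values())
-- ===== SOURCE B (Python) =====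
-- def _all_ids_accounted_for(result, players):
--     # Consume each pairing's ids from the set of player ids: an id that is
--     # absent (unknown player or already used) fails immediately; at the end the
--     # set must be exhausted.
--     def consume(rest, remaining):
--         if not rest:
--             return not remaining
--         pr = rest[0]
--         w = pr["white_id"]
--         if w not in remaining:
--             return False
--         remaining = remaining - {w}
--         b = pr.get("black_id")
--         if b is not None:
--             if b not in remaining:
--                 return False
--             remaining = remaining - {b}
--         return consume(rest[1:], remaining)
--     return consume(result, {p["id"] for p in players})
-- ===== Notes on version B (the rewrite author's own statement) =====
-- stated objective: alternative
-- what changed: B replaces A's build-a-count-dict-then-compare-key-sets-then-check-all-counts==1 approach by a recursive consumption of the player-id set: each pairing's ids are removed from the remaining set (failing early on an unknown or repeated id) and at the end the set must be empty.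
import Mathlib
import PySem

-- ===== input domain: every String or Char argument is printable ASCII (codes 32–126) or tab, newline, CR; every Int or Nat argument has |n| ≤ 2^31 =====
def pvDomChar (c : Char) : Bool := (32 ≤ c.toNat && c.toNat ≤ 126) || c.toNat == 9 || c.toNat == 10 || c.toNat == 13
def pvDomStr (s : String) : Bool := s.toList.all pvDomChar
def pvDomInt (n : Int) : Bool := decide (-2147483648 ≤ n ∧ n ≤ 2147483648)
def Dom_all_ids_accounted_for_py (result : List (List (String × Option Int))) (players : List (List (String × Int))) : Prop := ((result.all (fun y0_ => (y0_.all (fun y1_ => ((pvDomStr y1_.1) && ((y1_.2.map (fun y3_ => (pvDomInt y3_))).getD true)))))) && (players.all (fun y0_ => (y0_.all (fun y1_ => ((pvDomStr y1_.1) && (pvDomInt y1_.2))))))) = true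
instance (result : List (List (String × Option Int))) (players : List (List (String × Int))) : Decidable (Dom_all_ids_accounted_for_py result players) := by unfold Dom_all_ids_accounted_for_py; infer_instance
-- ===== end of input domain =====

-- B replaces A's count-dict + key-set comparison + all-counts==1 scan by a recursive
-- consumption of the player-id set: each pairing's ids are removed from the remaining set
-- (failing early on an unknown or repeated id) and at the end the set must be empty
-- (objective: alternative algorithm).
-- Python's mixed-type sets are modelled exactly: A's key set holds Option Int (None is a key),
-- B's remaining set holds Int, and 'None in remaining' is False as in Python.

-- ===== PORT A =====
def all_ids_accounted_for_py (result : List (List (String × Option Int))) (players : List (List (String × Int))) : Bool :=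
  -- seen[k] counts occurrences; pr["white_id"] is total here via getD none, exact under Pre_ (key present)
  let seen : PySem.Dict (Option Int) Int := result.foldl (fun seen pr =>
    let w := (PySem.Dict.get? (PySem.Dict.mk pr) "white_id").getD none
    let seen := seen.insert w (seen.getD w 0 + 1)
    -- pr.get("black_id") is not None: .get's default None and a stored None coincide, as in Python
    let b := (PySem.Dict.get? (PySem.Dict.mk pr) "black_id").getD none
    b.elim seen (fun b => seen.insert (some b) (seen.getD (some b) 0 + 1))) (PySem.Dict.empty : PySem.Dict (Option Int) Int)
  if !(PySem.Set.equal (PySem.Set.ofList seen.keys)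
        (PySem.Set.ofList (players.map (fun p => some ((PySem.Dict.get? (PySem.Dict.mk p) "id").getD 0)))))
  then false
  else seen.values.all (fun v => v == 1)

-- ===== PORT B =====
-- consume(rest, remaining): the inner recursive helper of Source B, step for step.
-- 'w not in remaining' with w possibly None and remaining a set of ints: None is never a
-- member, so the match on w makes that membership test explicit; 'remaining - {i}' is Set.diff.
def pvConsume : List (List (String × Option Int)) → PySem.Set Int → Bool
  | [], remaining => remaining.isEmpty
  | pr :: rest, remaining =>
    match (PySem.Dict.get? (PySem.Dict.mk pr) "white_id").getD none with
    | none => false      -- 'None in remaining' is False → return False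
    | some w =>
      if PySem.Set.contains remaining w then
        let remaining := PySem.Set.diff remaining [w]
        match (PySem.Dict.get? (PySem.Dict.mk pr) "black_id").getD none with
        | none => pvConsume rest remaining
        | some b =>
          if PySem.Set.contains remaining b then
            pvConsume rest (PySem.Set.diff remaining [b])
          else false
      else false

def all_ids_accounted_for_py_alt (result : List (List (String × Option Int))) (players : List (List (String × Int))) : Bool :=
  pvConsume result (PySem.Set.ofList (players.map (fun p => (PySem.Dict.get? (PySem.Dict.mk p) "id").getD 0)))

-- ===== PRECONDITION & SPEC =====
-- Pre_ excludes exactly the inputs where Python A raises KeyError: a pairing without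
-- the "white_id" key, or a player without the "id" key.
def Pre_all_ids_accounted_for_py (result : List (List (String × Option Int))) (players : List (List (String × Int))) : Prop :=
  (∀ pr ∈ result, (PySem.Dict.mk pr).contains "white_id" = true) ∧
  (∀ p ∈ players, (PySem.Dict.mk p).contains "id" = true)
instance (result : List (List (String × Option Int))) (players : List (List (String × Int))) : Decidable (Pre_all_ids_accounted_for_py result players) := by unfold Pre_all_ids_accounted_for_py; infer_instance

def pvWitness_all_ids_accounted_for_py : (List (List (String × Option Int))) × (List (List (String × Int))) :=
  ([[("white_id", some 1), ("black_id", some 2)]], [[("id", 1)], [("id", 2)]])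

def Spec_all_ids_accounted_for_py (result : List (List (String × Option Int))) (players : List (List (String × Int))) (out : Bool) : Prop := out = all_ids_accounted_for_py_alt result players
instance (result : List (List (String × Option Int))) (players : List (List (String × Int))) (out : Bool) : Decidable (Spec_all_ids_accounted_for_py result players out) := by unfold Spec_all_ids_accounted_for_py; infer_instance

-- ===== CLAIM (what is proved, stated in full; the proofs are below) =====
def Claim_equal_all_ids_accounted_for_py : Prop := ∀ (result : List (List (String × Option Int))) (players : List (List (String × Int))), Dom_all_ids_accounted_for_py result players → Pre_all_ids_accounted_for_py result players → Spec_all_ids_accounted_for_py result players (all_ids_accounted_for_py result players)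

-- ===== LEMMAS AND PROOFS =====

-- the ids one pairing contributes, in order
def pvChunk (pr : List (String × Option Int)) : List (Option Int) :=
  (PySem.Dict.get? (PySem.Dict.mk pr) "white_id").getD none ::
  ((PySem.Dict.get? (PySem.Dict.mk pr) "black_id").getD none).elim [] (fun b => [some b])

theorem pvFoldA (result : List (List (String × Option Int))) :
    result.foldl (fun seen pr =>
      let w := (PySem.Dict.get? (PySem.Dict.mk pr) "white_id").getD none
      let seen := seen.insert w (seen.getD w 0 + 1)
      let b := (PySem.Dict.get? (PySem.Dict.mk pr) "black_id").getD none
      b.elim seen (fun b => seen.insert (some b) (seen.getD (some b) 0 + 1))) (PySem.Dict.empty : PySem.Dict (Option Int) Int)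
    = PySem.Dict.counter (result.flatMap pvChunk) := by
  rw [← PySem.Dict.foldl_insert_getD_add_one_eq_counter, List.foldl_flatMap]
  congr 1
  funext d pr
  cases h : (PySem.Dict.get? (PySem.Dict.mk pr) "black_id").getD none <;> simp [pvChunk, h]

-- A's all-counts-are-1 test is exactly 'no id repeats'
theorem pvValuesOne (L : List (Option Int)) :
    ((PySem.Dict.counter L).values.all (fun v => v == 1)) = decide L.Nodup := by
  have hv : (PySem.Dict.counter L).values
      = (PySem.Set.ofList L).map (fun k => ((L.count k : Int))) := by
    simp [PySem.Dict.values, PySem.Dict.items_counter, Function.comp]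
  rw [hv]
  by_cases hnd : L.Nodup
  · have h1 := List.nodup_iff_count_eq_one.mp hnd
    simp only [hnd, decide_true, List.all_eq_true, List.mem_map]
    rintro v ⟨k, hk, rfl⟩
    have := h1 k ((PySem.Set.mem_ofList L k).mp hk)
    simp [this]
  · simp only [hnd, decide_false, List.all_eq_false]
    obtain ⟨a, haL, hane⟩ : ∃ a ∈ L, L.count a ≠ 1 := by
      by_contra hall
      push Not at hall
      exact hnd (List.nodup_iff_count_eq_one.mpr hall)
    refine ⟨(L.count a : Int), List.mem_map.mpr ⟨a, (PySem.Set.mem_ofList L a).mpr haL, rfl⟩, ?_⟩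
    simpa using fun h => hane (by exact_mod_cast h)

-- Python's set equality as membership equivalence
theorem pvEqualIff {α : Type} [BEq α] [LawfulBEq α] (s t : PySem.Set α) :
    PySem.Set.equal s t = true ↔ (∀ x, x ∈ s ↔ x ∈ t) := by
  simp only [PySem.Set.equal, PySem.Set.issubset, Bool.and_eq_true, List.all_eq_true,
    PySem.Set.contains, List.contains_iff_mem]
  constructor
  · rintro ⟨h1, h2⟩ x; exact ⟨h1 x, h2 x⟩
  · intro h; exact ⟨fun x hx => (h x).mp hx, fun x hx => (h x).mpr hx⟩

-- B's recursion over pairings equals a recursion over the flat id list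
def pvConsumeIds : List (Option Int) → PySem.Set Int → Bool
  | [], S => S.isEmpty
  | none :: _, _ => false
  | some i :: t, S =>
    if PySem.Set.contains S i then pvConsumeIds t (PySem.Set.diff S [i]) else false

theorem pvConsumeFlat (result : List (List (String × Option Int))) (S : PySem.Set Int) :
    pvConsume result S = pvConsumeIds (result.flatMap pvChunk) S := by
  induction result generalizing S with
  | nil => rfl
  | cons pr rest ih =>
    simp only [List.flatMap_cons, pvChunk, List.cons_append, pvConsume]
    cases hw : (PySem.Dict.get? (PySem.Dict.mk pr) "white_id").getD none with
    | none => rfl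
    | some w =>
      dsimp only
      simp only [pvConsumeIds]
      by_cases hc : PySem.Set.contains S w = true
      · rw [if_pos hc, if_pos hc]
        cases hb : (PySem.Dict.get? (PySem.Dict.mk pr) "black_id").getD none with
        | none => simpa using ih _
        | some b =>
          simp only [Option.elim, List.singleton_append, pvConsumeIds]
          by_cases hcb : PySem.Set.contains (PySem.Set.diff S [w]) b = true
          · rw [if_pos hcb, if_pos hcb, ih]
          · rw [if_neg hcb, if_neg hcb]
      · rw [if_neg hc, if_neg hc]

theorem pvDiffMem {α : Type} [BEq α] [LawfulBEq α] (S : PySem.Set α) (i x : α) :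
    x ∈ PySem.Set.diff S [i] ↔ x ∈ S ∧ x ≠ i := by
  simp [PySem.Set.diff, PySem.Set.contains, List.mem_filter]

theorem pvConsumeIdsIff (L : List (Option Int)) (S : PySem.Set Int) (hS : S.Nodup) :
    pvConsumeIds L S = true ↔
      (L.Nodup ∧ ∀ x, (x ∈ L ↔ ∃ i, x = some i ∧ i ∈ S)) := by
  induction L generalizing S with
  | nil =>
    simp only [pvConsumeIds, List.isEmpty_iff, List.nodup_nil, List.not_mem_nil, true_and]
    constructor
    · rintro rfl x; simp
    · intro h
      apply List.eq_nil_iff_forall_not_mem.mpr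
      intro i hi
      exact (false_iff _).mp (h (some i)) ⟨i, rfl, hi⟩
  | cons a t ih =>
    cases a with
    | none =>
      simp only [pvConsumeIds, Bool.false_eq_true, false_iff]
      rintro ⟨-, h⟩
      obtain ⟨i, hi, -⟩ := (h none).mp (List.mem_cons_self ..)
      simp at hi
    | some i =>
      by_cases hc : PySem.Set.contains S i = true
      · have hiS : i ∈ S := by simpa [PySem.Set.contains, List.contains_iff_mem] using hc
        have hS' : (PySem.Set.diff S [i]).Nodup := List.Nodup.filter _ hS
        simp only [pvConsumeIds]
        rw [if_pos hc, ih _ hS']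
        constructor
        · rintro ⟨hnd, hmem⟩
          have hnotin : some i ∉ t := by
            intro hin
            obtain ⟨j, hj, hjS⟩ := (hmem (some i)).mp hin
            exact ((pvDiffMem S i j).mp hjS).2 (by injection hj.symm)
          refine ⟨List.nodup_cons.mpr ⟨hnotin, hnd⟩, fun x => ?_⟩
          constructor
          · intro hx
            rcases List.mem_cons.mp hx with rfl | hx
            · exact ⟨i, rfl, hiS⟩
            · obtain ⟨j, hj, hjS⟩ := (hmem x).mp hx
              exact ⟨j, hj, ((pvDiffMem S i j).mp hjS).1⟩
          · rintro ⟨j, rfl, hjS⟩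
            by_cases hji : j = i
            · subst hji; exact List.mem_cons_self ..
            · exact List.mem_cons_of_mem _ ((hmem (some j)).mpr ⟨j, rfl, (pvDiffMem S i j).mpr ⟨hjS, hji⟩⟩)
        · rintro ⟨hnd, hmem⟩
          obtain ⟨hnotin, hndt⟩ := List.nodup_cons.mp hnd
          refine ⟨hndt, fun x => ?_⟩
          constructor
          · intro hx
            obtain ⟨j, rfl, hjS⟩ := (hmem x).mp (List.mem_cons_of_mem _ hx)
            refine ⟨j, rfl, (pvDiffMem S i j).mpr ⟨hjS, fun hji => ?_⟩⟩
            exact hnotin (hji ▸ hx)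
          · rintro ⟨j, rfl, hjS⟩
            obtain ⟨hjS', hji⟩ := (pvDiffMem S i j).mp hjS
            rcases List.mem_cons.mp ((hmem (some j)).mpr ⟨j, rfl, hjS'⟩) with h | h
            · exact absurd (by injection h) hji
            · exact h
      · have hiS : i ∉ S := by simpa [PySem.Set.contains, List.contains_iff_mem] using hc
        simp only [pvConsumeIds]
        rw [if_neg hc]
        simp only [Bool.false_eq_true, false_iff]
        rintro ⟨-, hmem⟩
        obtain ⟨j, hj, hjS⟩ := (hmem (some i)).mp (List.mem_cons_self ..)
        exact hiS ((by injection hj : i = j) ▸ hjS)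

-- ===== VERDICT (by name: the statement is the Claim_ definition above) =====
theorem all_ids_accounted_for_py_spec : Claim_equal_all_ids_accounted_for_py := by
  intro result players _ _
  unfold Spec_all_ids_accounted_for_py all_ids_accounted_for_py all_ids_accounted_for_py_alt
  rw [pvFoldA, pvConsumeFlat, Bool.eq_iff_iff]
  set L := result.flatMap pvChunk with hL
  set pids := players.map (fun p => (PySem.Dict.get? (PySem.Dict.mk p) "id").getD 0) with hpids
  have hmap : players.map (fun p => some ((PySem.Dict.get? (PySem.Dict.mk p) "id").getD 0))
      = pids.map some := by simp [hpids]
  rw [pvConsumeIdsIff L _ (PySem.Set.nodup_ofList pids)]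
  simp only [PySem.Dict.keys_counter, PySem.Set.ofList_ofList, pvValuesOne, hmap]
  have key : ∀ x : Option Int,
      (x ∈ List.map some pids ↔ ∃ i, x = some i ∧ i ∈ PySem.Set.ofList pids) := by
    intro x
    simp only [List.mem_map, PySem.Set.mem_ofList]
    constructor
    · rintro ⟨a, ha, rfl⟩; exact ⟨a, rfl, ha⟩
    · rintro ⟨i, rfl, hi⟩; exact ⟨i, hi, rfl⟩
  have hA : (if !(PySem.Set.equal (PySem.Set.ofList L) (PySem.Set.ofList (pids.map some)))
        then false else decide L.Nodup) = true
      ↔ (PySem.Set.equal (PySem.Set.ofList L) (PySem.Set.ofList (pids.map some)) = true ∧ L.Nodup) := by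
    by_cases heq : PySem.Set.equal (PySem.Set.ofList L) (PySem.Set.ofList (pids.map some)) = true
      <;> simp [heq]
  rw [hA, pvEqualIff]
  constructor
  · rintro ⟨hm, hnd⟩
    refine ⟨hnd, fun x => ?_⟩
    have h1 := hm x
    rw [PySem.Set.mem_ofList, PySem.Set.mem_ofList] at h1
    exact h1.trans (key x)
  · rintro ⟨hnd, hmem⟩
    refine ⟨fun x => ?_, hnd⟩
    rw [PySem.Set.mem_ofList, PySem.Set.mem_ofList]
    exact (hmem x).trans (key x).symm
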